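-- pv_equiv track=rewrite | github.com/ecly/a | day18/day18.py | solve
-- ===== SOURCE A (Python) =====
-- def valid_pos(acres, x, y):
--     return y >= 0 and y < len(acres) and x >= 0 and x < len(acres[y])
--
-- def get_adjacent(acres, x, y):
--     ax = [(-1, 0), (1, 0), (-1, 1), (1, 1), (-1, -1), (1, -1), (0, 1), (0, -1)]
--     ax = [(x+dx, y+dy) for dx, dy in ax if valid_pos(acres, x+dx, y+dy)]
--     return ''.join([acres[ny][nx] for nx, ny in ax])
--
-- def pass_minute(acres):
--     new_acres = []
--     for y, line in enumerate(acres):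
--         new_acres.append([])
--         for x, c in enumerate(line):
--             adjacent = get_adjacent(acres, x, y)
--             trees = adjacent.count("|")
--             open_ground = adjacent.count(".")
--             lumberyard = adjacent.count("#")
--             if c == ".":
--                 new_acres[y].append("|" if trees >= 3 else ".")
--             if c == "|":
--                 new_acres[y].append("#" if lumberyard >= 3 else "|")
--             if c == "#":
--                 new_acres[y].append("#" if lumberyard >= 1 and trees >= 1 else ".")
--
--
--     return new_acres
--
-- def solve(acres, count):
--     for _ in range(count):
--         acres = pass_minute(acres)
--
--     trees = 0
--     lumberyards = 0
--     for l in acres: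
--         for c in l:
--             if c == "#":
--                 lumberyards += 1
--             elif c == "|":
--                 trees += 1
--
--     return trees * lumberyards
-- ===== SOURCE B (Python) =====
-- # B: cycle detection over grid states; skips ahead via (count - t) % period once a repeat is seen.
-- OFFSETS = [(-1, 0), (1, 0), (-1, 1), (1, 1), (-1, -1), (1, -1), (0, 1), (0, -1)]
--
--
-- def _neighbor_counts(grid, x, y):
--     trees = 0
--     yards = 0
--     for dx, dy in OFFSETS:
--         nx, ny = x + dx, y + dy
--         if 0 <= ny < len(grid) and 0 <= nx < len(grid[ny]):
--             ch = grid[ny][nx]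
--             if ch == "|":
--                 trees += 1
--             elif ch == "#":
--                 yards += 1
--     return trees, yards
--
--
-- def _next_cell(grid, x, y, c):
--     trees, yards = _neighbor_counts(grid, x, y)
--     if c == ".":
--         return "|" if trees >= 3 else "."
--     if c == "|":
--         return "#" if yards >= 3 else "|"
--     return "#" if yards >= 1 and trees >= 1 else "."
--
--
-- def _step(grid):
--     return tuple(
--         "".join(
--             _next_cell(grid, x, y, c)
--             for x, c in enumerate(row)
--             if c in ".|#"
--         )
--         for y, row in enumerate(grid)
--     )
--
--
-- def solve(acres, count):
--     grid = tuple("".join(row) for row in acres)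
--     seen = {}
--     t = 0
--     while t < count:
--         if grid in seen:
--             rest = (count - t) % (t - seen[grid])
--             for _ in range(rest):
--                 grid = _step(grid)
--             break
--         seen[grid] = t
--         grid = _step(grid)
--         t += 1
--     trees = sum(row.count("|") for row in grid)
--     yards = sum(row.count("#") for row in grid)
--     return trees * yards
-- ===== Notes on version B (the rewrite author's own statement) =====
-- stated objective: faster
-- what changed: B detects a cycle in the sequence of grid states (dict of seen states) and jumps ahead by (count - t) % period instead of simulating all count minutes, and its per-minute step accumulates the two neighbour counts in one fold instead of building and re-counting an adjacency string.
import Mathlib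
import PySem

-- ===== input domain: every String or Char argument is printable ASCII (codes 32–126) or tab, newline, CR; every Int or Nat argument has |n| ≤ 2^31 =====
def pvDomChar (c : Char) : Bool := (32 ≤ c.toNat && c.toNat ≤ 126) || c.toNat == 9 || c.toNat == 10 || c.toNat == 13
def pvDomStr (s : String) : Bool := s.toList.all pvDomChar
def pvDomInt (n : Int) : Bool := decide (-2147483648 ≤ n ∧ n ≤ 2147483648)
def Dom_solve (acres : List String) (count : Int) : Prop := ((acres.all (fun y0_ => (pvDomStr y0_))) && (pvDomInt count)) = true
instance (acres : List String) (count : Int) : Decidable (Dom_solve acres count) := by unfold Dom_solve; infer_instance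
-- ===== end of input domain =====

-- B replaces A's minute-by-minute simulation with cycle detection on the grid states
-- (hash of seen states, then skip ahead by (count - t) % period); its per-minute step
-- accumulates neighbour counts in one fold instead of building the adjacency string.

-- ===== PORT A =====
def pvValidPos (g : List (List Char)) (x y : Int) : Bool :=
  decide (0 ≤ y) && decide (y < (g.length : Int)) && decide (0 ≤ x)
    && decide (x < ((PySem.List.pyGetD g y []).length : Int))

def pvGetAdjacent (g : List (List Char)) (x y : Int) : List Char :=
  let offs : List (Int × Int) := [(-1,0),(1,0),(-1,1),(1,1),(-1,-1),(1,-1),(0,1),(0,-1)]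
  let ax := (offs.map (fun d => (x + d.1, y + d.2))).filter (fun p => pvValidPos g p.1 p.2)
  -- ''.join over single chars = map of the indexings
  ax.map (fun p => PySem.List.pyGetD (PySem.List.pyGetD g p.2 []) p.1 ' ')

def pvPassMinute (g : List (List Char)) : List (List Char) :=
  (PySem.List.enumerate g).map (fun yl =>
    (PySem.List.enumerate yl.2).filterMap (fun xc =>
      let adjacent := pvGetAdjacent g xc.1 yl.1
      let trees := adjacent.count '|'
      let _openGround := adjacent.count '.'   -- computed by A, unused
      let lumberyard := adjacent.count '#'
      if xc.2 = '.' then some (if trees ≥ 3 then '|' else '.')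
      else if xc.2 = '|' then some (if lumberyard ≥ 3 then '#' else '|')
      else if xc.2 = '#' then some (if lumberyard ≥ 1 ∧ trees ≥ 1 then '#' else '.')
      else none))

def pvLoopA : Nat → List (List Char) → List (List Char)
  | 0, g => g
  | n+1, g => pvLoopA n (pvPassMinute g)

def solve (acres : List String) (count : Int) : Int :=
  let g := pvLoopA count.toNat (acres.map (·.toList))
  let tl := g.foldl (fun acc l =>
      l.foldl (fun (acc : Int × Int) c =>
        if c = '#' then (acc.1, acc.2 + 1)
        else if c = '|' then (acc.1 + 1, acc.2)
        else acc) acc) ((0 : Int), (0 : Int))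
  tl.1 * tl.2

-- ===== PORT B =====
def pvOffsets : List (Int × Int) := [(-1,0),(1,0),(-1,1),(1,1),(-1,-1),(1,-1),(0,1),(0,-1)]

def pvNeighborCounts (g : List (List Char)) (x y : Int) : Int × Int :=
  pvOffsets.foldl (fun (acc : Int × Int) d =>
      let nx := x + d.1
      let ny := y + d.2
      if 0 ≤ ny ∧ ny < (g.length : Int) ∧ 0 ≤ nx ∧ nx < ((PySem.List.pyGetD g ny []).length : Int) then
        let ch := PySem.List.pyGetD (PySem.List.pyGetD g ny []) nx ' '
        if ch = '|' then (acc.1 + 1, acc.2)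
        else if ch = '#' then (acc.1, acc.2 + 1)
        else acc
      else acc) ((0 : Int), (0 : Int))

def pvNextCell (g : List (List Char)) (x y : Int) (c : Char) : Char :=
  let ty := pvNeighborCounts g x y
  if c = '.' then (if ty.1 ≥ 3 then '|' else '.')
  else if c = '|' then (if ty.2 ≥ 3 then '#' else '|')
  else (if ty.2 ≥ 1 ∧ ty.1 ≥ 1 then '#' else '.')

def pvStepB (g : List (List Char)) : List (List Char) :=
  (PySem.List.enumerate g).map (fun yr =>
    ((PySem.List.enumerate yr.2).filter (fun xc => xc.2 = '.' ∨ xc.2 = '|' ∨ xc.2 = '#')).map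
      (fun xc => pvNextCell g xc.1 yr.1 xc.2))

def pvStepsB : Nat → List (List Char) → List (List Char)
  | 0, g => g
  | n+1, g => pvStepsB n (pvStepB g)

def pvLoopB (count : Int) : Nat → PySem.Dict (List (List Char)) Int → Int → List (List Char) → List (List Char)
  | 0, _, _, g => g
  | f+1, seen, t, g =>
    match seen.get? g with
    | some i => pvStepsB (PySem.Int.mod (count - t) (t - i)).toNat g
    | none => pvLoopB count f (seen.insert g t) (t + 1) (pvStepB g)

def solve_alt (acres : List String) (count : Int) : Int :=
  let g := pvLoopB count count.toNat PySem.Dict.empty 0 (acres.map (·.toList))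
  let trees := (g.map (fun row => (row.count '|' : Int))).sum
  let yards := (g.map (fun row => (row.count '#' : Int))).sum
  trees * yards

-- ===== PRECONDITION & SPEC =====
def Spec_solve (acres : List String) (count : Int) (out : Int) : Prop := out = solve_alt acres count
instance (acres : List String) (count : Int) (out : Int) : Decidable (Spec_solve acres count out) := by unfold Spec_solve; infer_instance

-- ===== CLAIM (what is proved, stated in full; the proofs are below) =====
def Claim_equal_solve : Prop := ∀ (acres : List String) (count : Int), Dom_solve acres count → Spec_solve acres count (solve acres count)

-- ===== LEMMAS AND PROOFS =====

-- B's neighbour fold computes exactly the two counts A takes from its adjacency string.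
lemma pvFold_counts (g : List (List Char)) (x y : Int) :
    ∀ (offs : List (Int × Int)) (acc : Int × Int),
      offs.foldl (fun (acc : Int × Int) d =>
        let nx := x + d.1
        let ny := y + d.2
        if 0 ≤ ny ∧ ny < (g.length : Int) ∧ 0 ≤ nx ∧ nx < ((PySem.List.pyGetD g ny []).length : Int) then
          let ch := PySem.List.pyGetD (PySem.List.pyGetD g ny []) nx ' '
          if ch = '|' then (acc.1 + 1, acc.2)
          else if ch = '#' then (acc.1, acc.2 + 1)
          else acc
        else acc) acc
      = (acc.1 + ((((offs.map (fun d => (x + d.1, y + d.2))).filter (fun p => pvValidPos g p.1 p.2)).map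
            (fun p => PySem.List.pyGetD (PySem.List.pyGetD g p.2 []) p.1 ' ')).count '|' : Int),
         acc.2 + ((((offs.map (fun d => (x + d.1, y + d.2))).filter (fun p => pvValidPos g p.1 p.2)).map
            (fun p => PySem.List.pyGetD (PySem.List.pyGetD g p.2 []) p.1 ' ')).count '#' : Int)) := by
  intro offs
  induction offs with
  | nil => intro acc; simp
  | cons d offs ih =>
      intro acc
      have hval : pvValidPos g (x + d.1) (y + d.2)
          = decide (0 ≤ y + d.2 ∧ y + d.2 < (g.length : Int) ∧ 0 ≤ x + d.1
              ∧ x + d.1 < ((PySem.List.pyGetD g (y + d.2) []).length : Int)) := by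
        simp [pvValidPos]
        rw [Bool.and_assoc, Bool.and_assoc]
      simp only [List.foldl_cons, List.map_cons, List.filter_cons, hval]
      by_cases hv : (0 ≤ y + d.2 ∧ y + d.2 < (g.length : Int) ∧ 0 ≤ x + d.1
          ∧ x + d.1 < ((PySem.List.pyGetD g (y + d.2) []).length : Int))
      · by_cases h1 : PySem.List.pyGetD (PySem.List.pyGetD g (y + d.2) []) (x + d.1) ' ' = '|'
        · simp [hv, h1, ih]
          omega
        · by_cases h2 : PySem.List.pyGetD (PySem.List.pyGetD g (y + d.2) []) (x + d.1) ' ' = '#'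
          · simp [hv, h2, ih]
            omega
          · simp [hv, h1, h2, ih]
      · simp [hv, ih]

lemma pvCounts_spec (g : List (List Char)) (x y : Int) :
    pvNeighborCounts g x y
      = (((pvGetAdjacent g x y).count '|' : Int), ((pvGetAdjacent g x y).count '#' : Int)) := by
  unfold pvNeighborCounts
  rw [pvFold_counts g x y pvOffsets]
  simp [pvGetAdjacent, pvOffsets]

-- per cell, A's branch chain and B's pvNextCell agree (on the three live characters)
lemma pvCell_eq (g : List (List Char)) (x y : Int) (c : Char)
    (hc : c = '.' ∨ c = '|' ∨ c = '#') :
    (let adjacent := pvGetAdjacent g x y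
     let trees := adjacent.count '|'
     let lumberyard := adjacent.count '#'
     if c = '.' then some (if trees ≥ 3 then '|' else '.')
     else if c = '|' then some (if lumberyard ≥ 3 then '#' else '|')
     else if c = '#' then some (if lumberyard ≥ 1 ∧ trees ≥ 1 then '#' else '.')
     else none) = some (pvNextCell g x y c) := by
  have cast3 : ∀ n : Nat, ((n : Int) ≥ 3) ↔ n ≥ 3 := fun n => by exact_mod_cast Iff.rfl
  have cast1 : ∀ n : Nat, ((n : Int) ≥ 1) ↔ n ≥ 1 := fun n => by exact_mod_cast Iff.rfl
  rcases hc with hc | hc | hc <;> subst hc <;>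
    simp [pvNextCell, pvCounts_spec, cast3, cast1]

lemma pvFilterMap_ite {α β : Type} (F : α → Option β) (p : α → Prop) [DecidablePred p]
    (h : α → β) (hF : ∀ a, F a = if p a then some (h a) else none) :
    ∀ l : List α, l.filterMap F = (l.filter (fun a => decide (p a))).map h := by
  intro l
  induction l with
  | nil => simp
  | cons a l ih =>
      by_cases ha : p a
      · simp [hF a, ha, ih]
      · simp [hF a, ha, ih]

lemma pvStep_eq (g : List (List Char)) : pvStepB g = pvPassMinute g := by
  unfold pvStepB pvPassMinute
  apply List.map_congr_left
  intro yl _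
  rw [← pvFilterMap_ite _ (fun xc : Int × Char => xc.2 = '.' ∨ xc.2 = '|' ∨ xc.2 = '#')
    (fun xc => pvNextCell g xc.1 yl.1 xc.2)]
  intro a
  by_cases ha : a.2 = '.' ∨ a.2 = '|' ∨ a.2 = '#'
  · rw [if_pos ha]
    exact pvCell_eq g a.1 yl.1 a.2 ha
  · rw [if_neg ha]
    push Not at ha
    simp [ha.1, ha.2.1, ha.2.2]

lemma pvStepsB_eq (n : Nat) (g : List (List Char)) : pvStepsB n g = pvLoopA n g := by
  induction n generalizing g with
  | zero => rfl
  | succ n ih => simp [pvStepsB, pvLoopA, pvStep_eq, ih]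

lemma pvLoopA_succ (n : Nat) (g : List (List Char)) :
    pvLoopA (n + 1) g = pvPassMinute (pvLoopA n g) := by
  induction n generalizing g with
  | zero => rfl
  | succ n ih => simpa [pvLoopA] using ih (pvPassMinute g)

lemma pvLoopA_add (a b : Nat) (g : List (List Char)) :
    pvLoopA (a + b) g = pvLoopA b (pvLoopA a g) := by
  induction a generalizing g with
  | zero => simp [pvLoopA]
  | succ a ih => rw [Nat.succ_add]; simp only [pvLoopA]; exact ih (pvPassMinute g)

lemma pvPeriodic (g0 : List (List Char)) (i p : Nat)
    (h : pvLoopA (i + p) g0 = pvLoopA i g0) :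
    ∀ q m, pvLoopA (i + q * p + m) g0 = pvLoopA (i + m) g0 := by
  have shift : ∀ m, pvLoopA (i + p + m) g0 = pvLoopA (i + m) g0 := by
    intro m
    rw [pvLoopA_add (i + p) m, h, ← pvLoopA_add]
  intro q
  induction q with
  | zero => intro m; simp
  | succ q ih =>
      intro m
      have e : i + (q + 1) * p + m = i + p + (q * p + m) := by ring
      rw [e, shift, ← Nat.add_assoc, ih]

lemma pvLoopB_eq (g0 : List (List Char)) (count : Int) :
    ∀ (f : Nat) (seen : PySem.Dict (List (List Char)) Int) (t : Int),
      0 ≤ t → t + f = count →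
      (∀ h i, seen.get? h = some i → 0 ≤ i ∧ i < t ∧ pvLoopA i.toNat g0 = h) →
      pvLoopB count f seen t (pvLoopA t.toNat g0) = pvLoopA count.toNat g0 := by
  intro f
  induction f with
  | zero =>
      intro seen t ht hc _
      have he : count.toNat = t.toNat := by omega
      simp [pvLoopB, he]
  | succ f ih =>
      intro seen t ht hc hinv
      simp only [pvLoopB]
      cases hget : seen.get? (pvLoopA t.toNat g0) with
      | none =>
          have hstep : pvStepB (pvLoopA t.toNat g0) = pvLoopA (t + 1).toNat g0 := by
            rw [pvStep_eq]
            have e : (t + 1).toNat = t.toNat + 1 := by omega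
            rw [e, pvLoopA_succ]
          rw [hstep]
          apply ih _ (t + 1) (by omega) (by omega)
          intro h i hsome
          rw [PySem.Dict.get?_insert] at hsome
          split_ifs at hsome with he
          · obtain rfl : i = t := by injection hsome with hv; omega
            exact ⟨ht, by omega, he.symm⟩
          · obtain ⟨h1, h2, h3⟩ := hinv h i hsome
            exact ⟨h1, by omega, h3⟩
      | some i =>
          show pvStepsB (PySem.Int.mod (count - t) (t - i)).toNat (pvLoopA t.toNat g0)
              = pvLoopA count.toNat g0
          obtain ⟨hi0, hit, hstate⟩ := hinv _ _ hget
          have hP : 0 < t.toNat - i.toNat := by omega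
          have hper : pvLoopA (i.toNat + (t.toNat - i.toNat)) g0 = pvLoopA i.toNat g0 := by
            have e : i.toNat + (t.toNat - i.toNat) = t.toNat := by omega
            rw [e, ← hstate]
          have h1 : count - t = ((f + 1 : Nat) : Int) := by omega
          have h2 : t - i = ((t.toNat - i.toNat : Nat) : Int) := by omega
          have hmod : (PySem.Int.mod (count - t) (t - i)).toNat
              = (f + 1) % (t.toNat - i.toNat) := by
            rw [h1, h2, PySem.Int.mod_eq_emod_of_pos (by omega), ← Int.natCast_mod,
              Int.toNat_natCast]
          rw [hmod, pvStepsB_eq, ← pvLoopA_add]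
          obtain ⟨q, hq⟩ : ∃ q, f + 1 = (t.toNat - i.toNat) * q + (f + 1) % (t.toNat - i.toNat) :=
            ⟨(f + 1) / (t.toNat - i.toNat), (Nat.div_add_mod _ _).symm⟩
          rw [Nat.mul_comm] at hq
          have hA : pvLoopA (t.toNat + (f + 1) % (t.toNat - i.toNat)) g0
              = pvLoopA (i.toNat + (f + 1) % (t.toNat - i.toNat)) g0 := by
            have e : t.toNat + (f + 1) % (t.toNat - i.toNat)
                = i.toNat + 1 * (t.toNat - i.toNat) + (f + 1) % (t.toNat - i.toNat) := by omega
            rw [e]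
            exact pvPeriodic g0 i.toNat _ hper 1 _
          have hB : pvLoopA (t.toNat + (f + 1)) g0
              = pvLoopA (i.toNat + (f + 1) % (t.toNat - i.toNat)) g0 := by
            have e : t.toNat + (f + 1)
                = i.toNat + q * (t.toNat - i.toNat)
                    + ((t.toNat - i.toNat) + (f + 1) % (t.toNat - i.toNat)) := by omega
            rw [e, pvPeriodic g0 i.toNat _ hper q _]
            have e2 : i.toNat + ((t.toNat - i.toNat) + (f + 1) % (t.toNat - i.toNat))
                = i.toNat + 1 * (t.toNat - i.toNat) + (f + 1) % (t.toNat - i.toNat) := by omega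
            rw [e2]
            exact pvPeriodic g0 i.toNat _ hper 1 _
          have hcnt : count.toNat = t.toNat + (f + 1) := by omega
          rw [hA, hcnt, hB]

-- the two scoring passes agree
lemma pvRow_counts :
    ∀ (l : List Char) (acc : Int × Int),
      l.foldl (fun (acc : Int × Int) c =>
        if c = '#' then (acc.1, acc.2 + 1)
        else if c = '|' then (acc.1 + 1, acc.2)
        else acc) acc
      = (acc.1 + (l.count '|' : Int), acc.2 + (l.count '#' : Int)) := by
  intro l
  induction l with
  | nil => intro acc; simp
  | cons c l ih =>
      intro acc
      by_cases h1 : c = '#'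
      · simp [h1, ih]
        omega
      · by_cases h2 : c = '|'
        · simp [h2, ih]
          omega
        · simp [h1, h2, ih]

lemma pvGrid_counts :
    ∀ (g : List (List Char)) (acc : Int × Int),
      g.foldl (fun acc l =>
        l.foldl (fun (acc : Int × Int) c =>
          if c = '#' then (acc.1, acc.2 + 1)
          else if c = '|' then (acc.1 + 1, acc.2)
          else acc) acc) acc
      = (acc.1 + (g.map (fun row => (row.count '|' : Int))).sum,
         acc.2 + (g.map (fun row => (row.count '#' : Int))).sum) := by
  intro g
  induction g with
  | nil => intro acc; simp
  | cons l g ih =>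
      intro acc
      rw [List.foldl_cons, ih, pvRow_counts]
      simp only [List.map_cons, List.sum_cons, Prod.mk.injEq]
      constructor <;> ring

lemma pvScore_eq (g : List (List Char)) :
    (g.foldl (fun acc l =>
      l.foldl (fun (acc : Int × Int) c =>
        if c = '#' then (acc.1, acc.2 + 1)
        else if c = '|' then (acc.1 + 1, acc.2)
        else acc) acc) ((0 : Int), (0 : Int)))
    = ((g.map (fun row => (row.count '|' : Int))).sum,
       (g.map (fun row => (row.count '#' : Int))).sum) := by
  simp [pvGrid_counts]

-- ===== VERDICT (by name: the statement is the Claim_ definition above) =====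
theorem solve_spec : Claim_equal_solve := by
  intro acres count _
  unfold Spec_solve
  simp only [solve, solve_alt]
  have hgrid : pvLoopB count count.toNat PySem.Dict.empty 0 (acres.map (·.toList))
      = pvLoopA count.toNat (acres.map (·.toList)) := by
    by_cases hc : 0 ≤ count
    · have h := pvLoopB_eq (acres.map (·.toList)) count count.toNat PySem.Dict.empty 0
        le_rfl (by omega) (by intro h i hsome; simp [PySem.Dict.get?_empty] at hsome)
      simpa [pvLoopA] using h
    · have h0 : count.toNat = 0 := by omega
      rw [h0]
      rfl
  rw [hgrid, pvScore_eq]
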